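-- pv_equiv track=rewrite | github.com/Hallowed8/codility_training_tasks | Leader.py | findDomi
-- ===== SOURCE A (Python) =====
-- def findDomi(A):
--     A=sorted(A)
--     counter = 1
--     for i in range(len(A)-1):
--         if A[i+1]==A[i]:
--             counter +=1
--             if counter > len(A)//2:
--                 return A[i]
--         else:
--             counter == 1
--     return None
-- ===== SOURCE B (Python) =====
-- def findDomi(A):
--     counts = {}
--     for x in A:
--         counts[x] = counts.get(x, 0) + 1
--     n = len(A)
--     for v, c in counts.items():
--         if c > n // 2:
--             return v
--     return None
-- ===== Notes on version B (the rewrite author's own statement) =====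
-- stated objective: simpler
-- what changed: Replaces the sort-and-adjacent-pair scan with a one-pass frequency dictionary followed by a scan for a value whose count exceeds n//2 (the actual dominator).
-- intended difference: On singleton lists A returns None though the lone element is a dominator, and on lists with no dominator but at least n//2 duplicate pairs (A's counter never resets: 'counter == 1' is a no-op) A returns a spurious value; B returns the true dominator or None, which is the intended behaviour. — e.g. on findDomi([1, 1, 2, 2]): A returns some 2, B returns none
import Mathlib
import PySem

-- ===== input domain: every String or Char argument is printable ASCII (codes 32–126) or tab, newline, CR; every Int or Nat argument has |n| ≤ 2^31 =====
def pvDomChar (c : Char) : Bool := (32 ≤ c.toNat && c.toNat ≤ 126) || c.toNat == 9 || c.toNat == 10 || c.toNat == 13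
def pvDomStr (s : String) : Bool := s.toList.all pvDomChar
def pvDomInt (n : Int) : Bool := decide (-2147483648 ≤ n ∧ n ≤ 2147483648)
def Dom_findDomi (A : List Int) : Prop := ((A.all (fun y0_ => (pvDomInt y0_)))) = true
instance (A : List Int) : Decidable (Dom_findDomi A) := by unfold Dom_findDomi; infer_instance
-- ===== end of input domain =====

-- B replaces A's sort-and-adjacent-pair scan by a frequency dictionary scanned for a count
-- exceeding n//2 (the actual dominator); on the D_ inputs below A's value is wrong and B's is intended.

-- ===== PORT A =====
-- the for-loop over i in range(len(A)-1) comparing A[i+1] with A[i], as structural recursion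
-- over the adjacent pairs of the (already sorted) list; A's 'counter == 1' line is a no-op.
def findDomiLoop (n : Int) (counter : Int) : List Int → Option Int
  | a :: b :: rest =>
      if b = a then
        if counter + 1 > PySem.Int.floordiv n 2 then some a
        else findDomiLoop n (counter + 1) (b :: rest)
      else findDomiLoop n counter (b :: rest)
  | _ => none

def findDomi (A : List Int) : Option Int :=
  let S := PySem.List.sorted A (fun x => x) false
  findDomiLoop ((S.length : Int)) 1 S

-- ===== PORT B =====
-- the loop 'for v, c in counts.items(): …' of Source B
def findDomiAltLoop (n : Int) : List (Int × Int) → Option Int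
  | (v, c) :: rest =>
      if c > PySem.Int.floordiv n 2 then some v
      else findDomiAltLoop n rest
  | [] => none

def findDomi_alt (A : List Int) : Option Int :=
  let counts := A.foldl (fun d x => d.insert x (d.getD x 0 + 1)) PySem.Dict.empty
  let n : Int := (A.length : Int)
  findDomiAltLoop n counts.items

-- ===== PRECONDITION & SPEC =====
-- On singleton lists A returns None though the lone element is a dominator, and on lists with no
-- dominator but at least len//2 duplicate pairs (A's counter never resets: 'counter == 1' is a
-- no-op) A returns a spurious value; B returns the true dominator or None, which is intended.
def D_findDomi (A : List Int) : Prop :=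
  A.length = 1 ∨
  ((∀ v ∈ A, A.count v ≤ A.length / 2) ∧
   A.length / 2 ≤ A.length - (PySem.List.dedup A).length ∧
   1 ≤ A.length - (PySem.List.dedup A).length)
instance (A : List Int) : Decidable (D_findDomi A) := by unfold D_findDomi; infer_instance

def Spec_findDomi (A : List Int) (out : Option Int) : Prop := ¬ D_findDomi A → out = findDomi_alt A
instance (A : List Int) (out : Option Int) : Decidable (Spec_findDomi A out) := by unfold Spec_findDomi; infer_instance

def pvDiffWitness_findDomi : List Int := [1, 1, 2, 2]
def pvDiffWitnessOut_findDomi : (Option Int) × (Option Int) := (some 2, none)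

-- ===== CLAIM (what is proved, stated in full; the proofs are below) =====
def Claim_unchanged_findDomi : Prop := ∀ (A : List Int), Dom_findDomi A → Spec_findDomi A (findDomi A)
def Claim_changed_findDomi : Prop := Dom_findDomi (pvDiffWitness_findDomi) ∧ D_findDomi (pvDiffWitness_findDomi) ∧ findDomi (pvDiffWitness_findDomi) = pvDiffWitnessOut_findDomi.1 ∧ findDomi_alt (pvDiffWitness_findDomi) = pvDiffWitnessOut_findDomi.2 ∧ pvDiffWitnessOut_findDomi.1 ≠ pvDiffWitnessOut_findDomi.2
def Claim_exact_findDomi : Prop := ∀ (A : List Int), Dom_findDomi A → D_findDomi A → findDomi A ≠ findDomi_alt A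

-- ===== LEMMAS AND PROOFS =====

-- reference loop at group granularity: A's scan over sorted A, one step per distinct value
def refLoop (n : Int) (counts : PySem.Dict Int Int) (counter : Int) : List Int → Option Int
  | v :: rest =>
      let c := counts.getD v 0
      if c > 1 then
        if counter + (c - 1) > PySem.Int.floordiv n 2 then some v
        else refLoop n counts (counter + (c - 1)) rest
      else refLoop n counts counter rest
  | [] => none

theorem runA (n : Int) (a : Int) (c : Nat) (hc : 1 ≤ c) (T : List Int)
    (hT : ∀ t ∈ T, t ≠ a) (counter : Int) :
    findDomiLoop n counter (List.replicate c a ++ T) =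
      if 1 < c ∧ counter + ((c : Int) - 1) > PySem.Int.floordiv n 2 then some a
      else findDomiLoop n (counter + ((c : Int) - 1)) T := by
  induction c generalizing counter with
  | zero => omega
  | succ k ih =>
    rcases Nat.eq_zero_or_pos k with hk | hk
    · subst hk
      simp only [List.replicate, List.singleton_append]
      cases T with
      | nil => simp [findDomiLoop]
      | cons t rest =>
        have ht : ¬ t = a := hT t (by simp)
        simp [findDomiLoop, ht]
    · have h1 : List.replicate (k+1) a ++ T = a :: a :: (List.replicate (k-1) a ++ T) := by
        conv_lhs => rw [show k + 1 = (k-1) + 1 + 1 by omega]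
        simp [List.replicate_succ]
      rw [h1]
      show (if a = a then _ else _) = _
      rw [if_pos rfl]
      have h2 : a :: (List.replicate (k-1) a ++ T) = List.replicate k a ++ T := by
        conv_rhs => rw [show k = (k-1) + 1 by omega]
        simp [List.replicate_succ]
      rw [h2, ih hk]
      have hm : counter + 1 + ((k:Int) - 1) = counter + (((k+1:Nat):Int) - 1) := by
        push_cast; ring
      rw [hm]
      have hk' : counter + (((k+1:Nat):Int) - 1) = counter + (k:Int) := by push_cast; ring
      have hkk : (1:Nat) < k + 1 := by omega
      split_ifs with hA hB hC hC' <;> first | rfl | omega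

theorem count_flatMap_replicate (D : List Int) (cnt : Int → Nat) (hnd : D.Nodup) (w : Int) :
    (D.flatMap (fun v => List.replicate (cnt v) v)).count w
      = if w ∈ D then cnt w else 0 := by
  induction D with
  | nil => simp
  | cons v D' ih =>
    simp only [List.flatMap_cons, List.count_append, List.count_replicate]
    have hnd' := (List.nodup_cons.mp hnd).2
    have hvD : v ∉ D' := (List.nodup_cons.mp hnd).1
    rw [ih hnd']
    by_cases hw : w = v
    · subst hw; simp [hvD]
    · simp [hw, Ne.symm hw]

theorem pairwise_flatMap_replicate (D : List Int) (cnt : Int → Nat)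
    (hs : D.Pairwise (· < ·)) :
    (D.flatMap (fun v => List.replicate (cnt v) v)).Pairwise (· ≤ ·) := by
  induction D with
  | nil => simp
  | cons v D' ih =>
    simp only [List.flatMap_cons]
    rw [List.pairwise_append]
    refine ⟨List.pairwise_replicate_of_refl, ih (List.pairwise_cons.mp hs).2, ?_⟩
    intro x hx y hy
    obtain ⟨u, hu, hyu⟩ := List.mem_flatMap.mp hy
    rw [List.eq_of_mem_replicate hx, List.eq_of_mem_replicate hyu]
    exact le_of_lt ((List.pairwise_cons.mp hs).1 u hu)

theorem mainLoop (n : Int) (cnt : Int → Nat) (D : List Int) (counts : PySem.Dict Int Int)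
    (hpos : ∀ v ∈ D, 1 ≤ cnt v)
    (hget : ∀ v ∈ D, counts.getD v 0 = (cnt v : Int))
    (hsort : D.Pairwise (· < ·)) (counter : Int) :
    findDomiLoop n counter (D.flatMap (fun v => List.replicate (cnt v) v))
      = refLoop n counts counter D := by
  induction D generalizing counter with
  | nil => simp [findDomiLoop, refLoop]
  | cons v D' ih =>
    simp only [List.flatMap_cons]
    have hsort' := (List.pairwise_cons.mp hsort).2
    have hlt := (List.pairwise_cons.mp hsort).1
    have hT : ∀ t ∈ D'.flatMap (fun u => List.replicate (cnt u) u), t ≠ v := by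
      intro t ht
      obtain ⟨u, hu, htu⟩ := List.mem_flatMap.mp ht
      have := ne_of_gt (hlt u hu)
      rwa [List.eq_of_mem_replicate htu]
    rw [runA n v (cnt v) (hpos v (by simp)) _ hT counter]
    have hc := hget v (by simp)
    have ih' := fun counter => ih (fun u hu => hpos u (by simp [hu]))
      (fun u hu => hget u (by simp [hu])) hsort' counter
    show _ = refLoop n counts counter (v :: D')
    simp only [refLoop, hc]
    by_cases h : 1 < cnt v
    · have h' : ((cnt v : Int)) > 1 := by exact_mod_cast h
      rw [if_pos h']
      by_cases hx : counter + ((cnt v : Int) - 1) > PySem.Int.floordiv n 2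
      · rw [if_pos ⟨h, hx⟩, if_pos hx]
      · rw [if_neg (fun hco => hx hco.2), if_neg hx]
        exact ih' _
    · have h1 : cnt v = 1 := by have := hpos v (by simp); omega
      have h' : ¬ ((cnt v : Int) > 1) := by rw [h1]; norm_num
      rw [if_neg h', if_neg (fun hco => h hco.1), h1]
      norm_num
      exact ih' counter

theorem findDomi_eq_ref (A : List Int) :
    findDomi A = refLoop ((A.length : Int)) (PySem.Dict.counter A) 1
      (PySem.List.sorted (PySem.Set.ofList A) (fun x => x) false) := by
  unfold findDomi
  dsimp only
  set D := PySem.List.sorted (PySem.Set.ofList A) (fun x => x) false with hD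
  have hmemD : ∀ v, v ∈ D ↔ v ∈ A := by
    intro v
    rw [hD, PySem.List.mem_sorted, PySem.Set.mem_ofList]
  have hndD : D.Nodup := by
    exact ((PySem.List.sorted_perm _ _ _).nodup_iff).mpr (PySem.Set.nodup_ofList A)
  have hleD : D.Pairwise (· ≤ ·) := PySem.List.sorted_pairwise _ _
  have hsortD : D.Pairwise (· < ·) := by
    exact (hleD.and hndD).imp (fun h => lt_of_le_of_ne h.1 h.2)
  have hflat : PySem.List.sorted A (fun x => x) false
      = D.flatMap (fun v => List.replicate (A.count v) v) := by
    apply PySem.List.sorted_id_eq_of_perm_of_pairwise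
    · rw [List.perm_iff_count]
      intro w
      rw [count_flatMap_replicate D _ hndD w]
      by_cases hw : w ∈ D
      · simp [hw]
      · have : w ∉ A := fun h => hw ((hmemD w).mpr h)
        simp [hw, List.count_eq_zero_of_not_mem this]
    · exact pairwise_flatMap_replicate D _ hsortD
  have hlen : (PySem.List.sorted A (fun x => x) false).length = A.length :=
    (PySem.List.sorted_perm _ _ _).length_eq
  rw [hlen, hflat]
  apply mainLoop
  · intro v hv
    exact List.one_le_count_iff.mpr ((hmemD v).mp hv)
  · intro v hv
    exact PySem.Dict.getD_counter A v
  · exact hsortD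

-- the reference loop returns none when even the final cumulative counter stays ≤ n//2
theorem refA (n : Int) (counts : PySem.Dict Int Int) :
    ∀ (D : List Int) (counter : Int),
    (∀ v ∈ D, 1 ≤ counts.getD v 0) →
    counter + ((D.map (fun v => counts.getD v 0 - 1)).sum) ≤ PySem.Int.floordiv n 2 →
    refLoop n counts counter D = none := by
  intro D
  induction D with
  | nil => intro counter _ _; simp [refLoop]
  | cons v rest ih =>
    intro counter hpos hle
    have hc1 : 1 ≤ counts.getD v 0 := hpos v (by simp)
    have hnn : 0 ≤ (rest.map (fun u => counts.getD u 0 - 1)).sum := by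
      apply List.sum_nonneg
      intro x hx
      obtain ⟨u, hu, hxu⟩ := List.mem_map.mp hx
      have := hpos u (by simp [hu])
      omega
    simp only [List.map_cons, List.sum_cons] at hle
    simp only [refLoop]
    by_cases h : counts.getD v 0 > 1
    · rw [if_pos h, if_neg (by omega)]
      exact ih _ (fun u hu => hpos u (by simp [hu])) (by omega)
    · rw [if_neg h]
      exact ih _ (fun u hu => hpos u (by simp [hu])) (by omega)

-- the reference loop returns a value when the final cumulative counter crosses n//2
-- and some group has size ≥ 2
theorem refB (n : Int) (counts : PySem.Dict Int Int) :
    ∀ (D : List Int) (counter : Int),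
    (∀ v ∈ D, 1 ≤ counts.getD v 0) →
    (∃ v ∈ D, 1 < counts.getD v 0) →
    PySem.Int.floordiv n 2 < counter + ((D.map (fun v => counts.getD v 0 - 1)).sum) →
    (refLoop n counts counter D).isSome = true := by
  intro D
  induction D with
  | nil => intro counter _ hex _; simp at hex
  | cons v rest ih =>
    intro counter hpos hex hgt
    simp only [List.map_cons, List.sum_cons] at hgt
    simp only [refLoop]
    by_cases h : counts.getD v 0 > 1
    · rw [if_pos h]
      by_cases htr : counter + (counts.getD v 0 - 1) > PySem.Int.floordiv n 2
      · rw [if_pos htr]; rfl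
      · rw [if_neg htr]
        apply ih _ (fun u hu => hpos u (by simp [hu]))
        · by_contra hall
          push Not at hall
          have hz : (rest.map (fun u => counts.getD u 0 - 1)).sum = 0 := by
            apply List.sum_eq_zero
            intro x hx
            obtain ⟨u, hu, hxu⟩ := List.mem_map.mp hx
            have h1 := hpos u (by simp [hu])
            have h2 := hall u hu
            omega
          omega
        · omega
    · rw [if_neg h]
      have hc1 : 1 ≤ counts.getD v 0 := hpos v (by simp)
      obtain ⟨u, hu, hugt⟩ := hex
      rcases List.mem_cons.mp hu with he | hu'
      · exact absurd (he ▸ hugt) h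
      · exact ih _ (fun w hw => hpos w (by simp [hw])) ⟨u, hu', hugt⟩ (by omega)

-- when a dominator exists the reference loop returns exactly it
theorem ref_dom (n : Int) (counts : PySem.Dict Int Int) (d : Int)
    (hn2 : 1 ≤ PySem.Int.floordiv n 2)
    (hn3 : n ≤ 2 * PySem.Int.floordiv n 2 + 1) :
    ∀ (D : List Int) (counter : Int),
    (∀ v ∈ D, 1 ≤ counts.getD v 0) →
    d ∈ D →
    PySem.Int.floordiv n 2 < counts.getD d 0 →
    1 ≤ counter →
    counter - 1 + ((D.map (fun v => counts.getD v 0)).sum) ≤ n →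
    refLoop n counts counter D = some d := by
  intro D
  induction D with
  | nil => intro counter _ hd; simp at hd
  | cons v rest ih =>
    intro counter hpos hd hdom hco hsum
    simp only [List.map_cons, List.sum_cons] at hsum
    simp only [refLoop]
    rcases List.mem_cons.mp hd with he | hd'
    · subst he
      have h2 : counts.getD d 0 > 1 := by omega
      rw [if_pos h2, if_pos (by omega)]
    · have hcd : counts.getD d 0 ≤ (rest.map (fun u => counts.getD u 0)).sum := by
        apply List.single_le_sum
        · intro x hx
          obtain ⟨u, hu, hxu⟩ := List.mem_map.mp hx
          have := hpos u (by simp [hu])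
          omega
        · exact List.mem_map.mpr ⟨d, hd', rfl⟩
      have hc1 : 1 ≤ counts.getD v 0 := hpos v (by simp)
      by_cases h : counts.getD v 0 > 1
      · rw [if_pos h, if_neg (by omega)]
        exact ih _ (fun u hu => hpos u (by simp [hu])) hd' hdom (by omega) (by omega)
      · rw [if_neg h]
        exact ih _ (fun u hu => hpos u (by simp [hu])) hd' hdom hco (by omega)

-- B's loop: none when no pair crosses the threshold
theorem altLoop_none (n : Int) :
    ∀ (L : List (Int × Int)),
    (∀ p ∈ L, ¬ (p.2 > PySem.Int.floordiv n 2)) →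
    findDomiAltLoop n L = none := by
  intro L
  induction L with
  | nil => intro _; rfl
  | cons p rest ih =>
    intro h
    obtain ⟨v, c⟩ := p
    simp only [findDomiAltLoop]
    rw [if_neg (h (v, c) (by simp))]
    exact ih (fun q hq => h q (by simp [hq]))

-- B's loop: returns d when (d, cd) is the unique crossing pair present
theorem altLoop_first (n : Int) (d cd : Int) :
    ∀ (L : List (Int × Int)),
    (d, cd) ∈ L →
    cd > PySem.Int.floordiv n 2 →
    (∀ p ∈ L, p.2 > PySem.Int.floordiv n 2 → p = (d, cd)) →
    findDomiAltLoop n L = some d := by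
  intro L
  induction L with
  | nil => intro hm; simp at hm
  | cons p rest ih =>
    intro hm hcd huniq
    obtain ⟨v, c⟩ := p
    simp only [findDomiAltLoop]
    by_cases h : c > PySem.Int.floordiv n 2
    · rw [if_pos h]
      have := huniq (v, c) (by simp) h
      simp only [Prod.mk.injEq] at this
      rw [this.1]
    · rw [if_neg h]
      rcases List.mem_cons.mp hm with he | hm'
      · injection he with h1 h2
        rw [← h2] at h
        exact absurd hcd h
      · exact ih hm' hcd (fun q hq => huniq q (by simp [hq]))

-- two distinct values cannot both have count > len/2
theorem count_add_count_le (A : List Int) (u v : Int) (h : u ≠ v) :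
    A.count u + A.count v ≤ A.length := by
  induction A with
  | nil => simp
  | cons a t ih =>
    simp only [List.count_cons, List.length_cons, beq_iff_eq]
    split_ifs with h1 h2 <;> omega

-- B's port rewritten through the counter dictionary
theorem alt_eq (A : List Int) :
    findDomi_alt A = findDomiAltLoop ((A.length : Int))
      ((PySem.Set.ofList A).map (fun k => (k, (A.count k : Int)))) := by
  unfold findDomi_alt
  dsimp only
  rw [PySem.Dict.foldl_insert_getD_add_one_eq_counter, PySem.Dict.items_counter]

theorem alt_none_of_noDom (A : List Int)
    (h : ∀ v ∈ A, A.count v ≤ A.length / 2) : findDomi_alt A = none := by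
  rw [alt_eq]
  apply altLoop_none
  intro p hp
  obtain ⟨k, hk, hpk⟩ := List.mem_map.mp hp
  subst hpk
  have hkA : k ∈ A := (PySem.Set.mem_ofList A k).mp hk
  have hle := h k hkA
  have hfd : PySem.Int.floordiv ((A.length : Int)) 2 = ((A.length / 2 : Nat) : Int) := by
    exact_mod_cast PySem.Int.floordiv_natCast A.length 2
  rw [hfd]
  intro hgt
  have h2 : A.length / 2 < A.count k := by
    exact_mod_cast (show ((A.length / 2 : Nat) : Int) < ((A.count k : Nat) : Int) from hgt)
  omega

theorem alt_some_of_dom (A : List Int) (d : Int) (hd : d ∈ A)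
    (hdom : A.length / 2 < A.count d) : findDomi_alt A = some d := by
  rw [alt_eq]
  apply altLoop_first ((A.length : Int)) d ((A.count d : Int))
  · exact List.mem_map.mpr ⟨d, (PySem.Set.mem_ofList A d).mpr hd, rfl⟩
  · have hfd : PySem.Int.floordiv ((A.length : Int)) 2 = ((A.length / 2 : Nat) : Int) := by
      exact_mod_cast PySem.Int.floordiv_natCast A.length 2
    rw [hfd]; exact_mod_cast hdom
  · intro p hp hgt
    obtain ⟨k, hk, hpk⟩ := List.mem_map.mp hp
    subst hpk
    have hfd : PySem.Int.floordiv ((A.length : Int)) 2 = ((A.length / 2 : Nat) : Int) := by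
      exact_mod_cast PySem.Int.floordiv_natCast A.length 2
    rw [hfd] at hgt
    have hkc : A.length / 2 < A.count k := by
      exact_mod_cast (show ((A.length / 2 : Nat) : Int) < ((A.count k : Nat) : Int) from hgt)
    have hkA : k ∈ A := (PySem.Set.mem_ofList A k).mp hk
    by_cases hkd : k = d
    · rw [hkd]
    · have := count_add_count_le A k d hkd
      omega

-- facts about D = sorted distinct values of A
theorem memD (A : List Int) (v : Int) :
    v ∈ PySem.List.sorted (PySem.Set.ofList A) (fun x => x) false ↔ v ∈ A := by
  rw [PySem.List.mem_sorted, PySem.Set.mem_ofList]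

theorem ndD (A : List Int) :
    (PySem.List.sorted (PySem.Set.ofList A) (fun x => x) false).Nodup :=
  ((PySem.List.sorted_perm _ _ _).nodup_iff).mpr (PySem.Set.nodup_ofList A)

theorem lenD (A : List Int) :
    (PySem.List.sorted (PySem.Set.ofList A) (fun x => x) false).length
      = (PySem.List.dedup A).length := by
  rw [PySem.List.dedup_eq_ofList]
  exact (PySem.List.sorted_perm _ _ _).length_eq

theorem sumD (A : List Int) :
    (((PySem.List.sorted (PySem.Set.ofList A) (fun x => x) false).map
       (fun v => A.count v)).sum = A.length) := by
  set D := PySem.List.sorted (PySem.Set.ofList A) (fun x => x) false with hD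
  have hperm : (D.flatMap (fun v => List.replicate (A.count v) v)).Perm A := by
    rw [List.perm_iff_count]
    intro w
    rw [count_flatMap_replicate D _ (ndD A) w]
    by_cases hw : w ∈ D
    · simp [hw]
    · have : w ∉ A := fun h => hw ((memD A w).mpr h)
      simp [hw, List.count_eq_zero_of_not_mem this]
  have hlen := hperm.length_eq
  rw [List.length_flatMap] at hlen
  simp only [List.length_replicate] at hlen
  exact hlen

theorem sum_map_intCast (D : List Int) (f : Int → Nat) :
    (D.map (fun v => ((f v : Nat) : Int))).sum = (((D.map f).sum : Nat) : Int) := by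
  induction D with
  | nil => simp
  | cons a t ih => simp [ih]

theorem sum_map_sub_one (D : List Int) (f : Int → Int) :
    (D.map (fun v => f v - 1)).sum = (D.map f).sum - D.length := by
  induction D with
  | nil => simp
  | cons a t ih => simp [ih]; ring

theorem sum_ge_length (l : List Nat) (h : ∀ x ∈ l, 1 ≤ x) : l.length ≤ l.sum := by
  induction l with
  | nil => simp
  | cons a t ih =>
    have := h a (by simp)
    have := ih (fun x hx => h x (by simp [hx]))
    simp only [List.length_cons, List.sum_cons]
    omega

theorem sum_le_length (l : List Nat) (h : ∀ x ∈ l, x ≤ 1) : l.sum ≤ l.length := by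
  induction l with
  | nil => simp
  | cons a t ih =>
    have := h a (by simp)
    have := ih (fun x hx => h x (by simp [hx]))
    simp only [List.length_cons, List.sum_cons]
    omega

theorem getD_map_eq (A : List Int) (D : List Int) :
    D.map (fun v => (PySem.Dict.counter A).getD v 0)
      = D.map (fun v => ((A.count v : Nat) : Int)) :=
  List.map_congr_left (fun v _ => PySem.Dict.getD_counter A v)

theorem unchanged_core (A : List Int) (hnD : ¬ D_findDomi A) :
    findDomi A = findDomi_alt A := by
  unfold D_findDomi at hnD
  push Not at hnD
  obtain ⟨hn1, hq⟩ := hnD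
  rcases List.eq_nil_or_concat A with rfl | ⟨_, _, _⟩
  · decide
  case inr hcc =>
  have hApos : 0 < A.length := by
    obtain ⟨l, x, rfl⟩ := hcc; simp
  have hn2 : 2 ≤ A.length := by omega
  have hfd : PySem.Int.floordiv ((A.length : Int)) 2 = ((A.length / 2 : Nat) : Int) := by
    exact_mod_cast PySem.Int.floordiv_natCast A.length 2
  set D := PySem.List.sorted (PySem.Set.ofList A) (fun x => x) false with hDdef
  have hsum : (D.map (fun v => (PySem.Dict.counter A).getD v 0)).sum = (A.length : Int) := by
    rw [getD_map_eq, sum_map_intCast, sumD]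
  have hpos : ∀ v ∈ D, 1 ≤ (PySem.Dict.counter A).getD v 0 := by
    intro v hv
    rw [PySem.Dict.getD_counter]
    exact_mod_cast List.one_le_count_iff.mpr ((memD A v).mp hv)
  by_cases hdom : ∃ d ∈ A, A.length / 2 < A.count d
  · obtain ⟨d, hdA, hdc⟩ := hdom
    rw [alt_some_of_dom A d hdA hdc, findDomi_eq_ref]
    apply ref_dom
    · rw [hfd]; exact_mod_cast (by omega : 1 ≤ A.length / 2)
    · rw [hfd]; exact_mod_cast (by omega : A.length ≤ 2 * (A.length / 2) + 1)
    · exact hpos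
    · exact (memD A d).mpr hdA
    · rw [hfd, PySem.Dict.getD_counter]; exact_mod_cast hdc
    · omega
    · rw [hsum]; omega
  · push Not at hdom
    have hno : ∀ v ∈ A, A.count v ≤ A.length / 2 := fun v hv => by
      have := hdom v hv; omega
    rw [alt_none_of_noDom A hno, findDomi_eq_ref]
    have hk_le : D.length ≤ A.length := by
      have h1 : D.length ≤ (D.map (fun v => A.count v)).sum := by
        have := sum_ge_length (D.map (fun v => A.count v)) (by
          intro x hx
          obtain ⟨u, hu, hxu⟩ := List.mem_map.mp hx
          subst hxu
          exact List.one_le_count_iff.mpr ((memD A u).mp hu))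
        simpa using this
      rw [sumD] at h1
      exact h1
    have hcase : A.length - (PySem.List.dedup A).length < A.length / 2 ∨
        A.length - (PySem.List.dedup A).length = 0 := by
      by_cases h2 : A.length / 2 ≤ A.length - (PySem.List.dedup A).length
      · right
        have := hq hno h2
        omega
      · left; omega
    apply refA
    · exact hpos
    · have hkD : D.length = (PySem.List.dedup A).length := lenD A
      have hgoal : (1:Int) + ((A.length : Int) - (D.length : Int)) ≤ (((A.length / 2 : Nat)) : Int) := by
        rcases hcase with h | h <;> omega
      rw [sum_map_sub_one, hsum, hfd]
      exact_mod_cast hgoal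

theorem tight_core (A : List Int) (hD : D_findDomi A) :
    findDomi A ≠ findDomi_alt A := by
  rcases hD with h1 | ⟨hno, hq1, hq2⟩
  · -- singleton: A = [a]; the Python A returns None, B returns the lone element
    obtain ⟨a, rfl⟩ : ∃ a, A = [a] := by
      cases A with
      | nil => simp at h1
      | cons a t =>
        cases t with
        | nil => exact ⟨a, rfl⟩
        | cons b t' => simp at h1
    have hBa : findDomi_alt [a] = some a :=
      alt_some_of_dom [a] a (by simp) (by simp)
    have hAa : findDomi [a] = none := by
      rw [findDomi_eq_ref]
      have hD1 : PySem.List.sorted (PySem.Set.ofList [a]) (fun x => x) false = [a] := by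
        have hp : (PySem.List.sorted (PySem.Set.ofList [a]) (fun x => x) false).Perm [a] := by
          have h2 : PySem.Set.ofList [a] = [a] := rfl
          rw [h2]
          exact PySem.List.sorted_perm _ _ _
        exact List.perm_singleton.mp hp
      rw [hD1]
      simp only [refLoop, PySem.Dict.getD_counter]
      norm_num
    rw [hAa, hBa]
    simp
  · -- no dominator but enough duplicate pairs: A returns a spurious value, B returns none
    rw [alt_none_of_noDom A hno]
    rw [findDomi_eq_ref]
    set D := PySem.List.sorted (PySem.Set.ofList A) (fun x => x) false with hDdef
    have hkD : D.length = (PySem.List.dedup A).length := by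
      rw [hDdef]; exact lenD A
    have hk_le : D.length ≤ A.length := by
      have h1 : D.length ≤ (D.map (fun v => A.count v)).sum := by
        have := sum_ge_length (D.map (fun v => A.count v)) (by
          intro x hx
          obtain ⟨u, hu, hxu⟩ := List.mem_map.mp hx
          subst hxu
          exact List.one_le_count_iff.mpr ((memD A u).mp hu))
        simpa using this
      rw [sumD] at h1
      exact h1
    have hfd : PySem.Int.floordiv ((A.length : Int)) 2 = ((A.length / 2 : Nat) : Int) := by
      exact_mod_cast PySem.Int.floordiv_natCast A.length 2
    have hsum : (D.map (fun v => (PySem.Dict.counter A).getD v 0)).sum = (A.length : Int) := by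
      rw [getD_map_eq, sum_map_intCast, sumD]
    have hpos : ∀ v ∈ D, 1 ≤ (PySem.Dict.counter A).getD v 0 := by
      intro v hv
      rw [PySem.Dict.getD_counter]
      exact_mod_cast List.one_le_count_iff.mpr ((memD A v).mp hv)
    have hex : ∃ v ∈ D, 1 < (PySem.Dict.counter A).getD v 0 := by
      by_contra hall
      push Not at hall
      have hle1 : ∀ v ∈ D, A.count v ≤ 1 := by
        intro v hv
        have := hall v hv
        rw [PySem.Dict.getD_counter] at this
        exact_mod_cast this
      have hsle : (D.map (fun v => A.count v)).sum ≤ D.length := by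
        have := sum_le_length (D.map (fun v => A.count v)) (by
          intro x hx
          obtain ⟨u, hu, hxu⟩ := List.mem_map.mp hx
          subst hxu
          exact hle1 u hu)
        simpa using this
      rw [sumD] at hsle
      omega
    have hbig : PySem.Int.floordiv ((A.length : Int)) 2
        < 1 + ((D.map (fun v => (PySem.Dict.counter A).getD v 0 - 1)).sum) := by
      have h2 : (((A.length / 2 : Nat)) : Int) < 1 + ((A.length : Int) - (D.length : Int)) := by
        omega
      rw [sum_map_sub_one, hsum, hfd]
      exact_mod_cast h2
    have hres := refB ((A.length : Int)) (PySem.Dict.counter A) D 1 hpos hex (by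
      calc PySem.Int.floordiv ((A.length : Int)) 2
          < 1 + ((D.map (fun v => (PySem.Dict.counter A).getD v 0 - 1)).sum) := hbig
        _ = _ := by ring)
    intro heq
    rw [heq] at hres
    simp at hres

-- ===== VERDICT (by name: the statements are the Claim_ definitions above) =====
theorem findDomi_spec : Claim_unchanged_findDomi := by
  intro A _ hnD
  exact unchanged_core A hnD

theorem findDomi_changed : Claim_changed_findDomi := by
  unfold Claim_changed_findDomi; decide

theorem findDomi_tight : Claim_exact_findDomi := by
  intro A _ hD
  exact tight_core A hD
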